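-- pv_equiv track=rewrite | github.com/lowRISC/opentitan | util/reggen/data.py | _get_basename
-- ===== SOURCE A (Python) =====
-- def _get_basename(name):
--     for (k, c) in enumerate(name[::-1]):
--         if not str.isdigit(c):
--             if c == "_":
--                 return name[0:len(name) - (k + 1)]
--             else:
--                 break
--     return ""
-- ===== SOURCE B (Python) =====
-- def _get_basename(name):
--     head, sep, tail = name.rpartition('_')
--     return head if sep and (tail == '' or tail.isdigit()) else ''
-- ===== Notes on version B (the rewrite author's own statement) =====
-- stated objective: simpler
-- what changed: Instead of A's explicit reverse character scan with inline break/return and slice arithmetic, B splits the name at its LAST underscore with str.rpartition and returns the head iff the suffix after it is empty or all digits (str.isdigit) - a locate-separator-then-validate-suffix decomposition with no index arithmetic.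
import Mathlib
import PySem

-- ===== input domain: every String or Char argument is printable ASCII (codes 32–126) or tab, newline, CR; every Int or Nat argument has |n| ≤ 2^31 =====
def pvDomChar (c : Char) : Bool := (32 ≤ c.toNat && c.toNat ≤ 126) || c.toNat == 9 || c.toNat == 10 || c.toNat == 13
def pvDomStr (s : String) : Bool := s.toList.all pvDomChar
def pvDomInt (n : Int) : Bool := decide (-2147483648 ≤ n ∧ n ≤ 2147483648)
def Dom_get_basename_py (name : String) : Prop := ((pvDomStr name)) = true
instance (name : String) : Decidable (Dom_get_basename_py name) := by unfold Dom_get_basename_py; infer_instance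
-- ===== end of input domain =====

-- B replaces A's reverse scan by rpartition at the last '_' plus an isdigit check on the suffix; objective: simpler.

-- ===== PORT A =====
-- the loop 'for (k, c) in enumerate(name[::-1])' (name[::-1] is the reversed character list)
def basenameLoopA (name : String) : List Char → Nat → String
  | [], _ => ""
  | c :: cs, k =>
    if ¬ PySem.Chars.isdigit c = true then
      if c = '_' then PySem.Str.slice name (some 0) (some (PySem.Str.len name - ((k : Int) + 1)))
      else ""
    else basenameLoopA name cs (k + 1)

def get_basename_py (name : String) : String :=
  basenameLoopA name name.toList.reverse 0

-- ===== PORT B =====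
-- hand port of str.rpartition('_'): scan from the right for the last '_' (exact for a 1-char separator):
-- returns (head, sep-found?, tail); ('', False, name) when '_' is absent, as Python's ('', '', name)
def rpartitionU (l : List Char) : List Char × Bool × List Char :=
  match l.reverse.span (fun c => c ≠ '_') with
  | (_, []) => ([], false, l)
  | (t, _ :: r) => (r.reverse, true, t.reverse)

def get_basename_py_alt (name : String) : String :=
  match rpartitionU name.toList with
  | (head, sep, tail) =>
    if sep && (tail.isEmpty || PySem.Chars.strIsdigit tail) then String.ofList head else ""

-- ===== PRECONDITION & SPEC =====
def Spec_get_basename_py (name : String) (out : String) : Prop := out = get_basename_py_alt name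
instance (name : String) (out : String) : Decidable (Spec_get_basename_py name out) := by unfold Spec_get_basename_py; infer_instance

-- ===== CLAIM (what is proved, stated in full; the proofs are below) =====
def Claim_equal_get_basename_py : Prop := ∀ (name : String), Dom_get_basename_py name → Spec_get_basename_py name (get_basename_py name)

-- ===== LEMMAS AND PROOFS =====

-- the common value both ports compute, on the reversed character list
def basenameCore (name : String) : String :=
  match name.toList.reverse.dropWhile PySem.Chars.isdigit with
  | [] => ""
  | c :: t => if c = '_' then String.ofList t.reverse else ""

-- A's slice name[0 : len-(k+1)], taken where reverse.drop k = c :: cs, is cs reversed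
lemma slice_tail_eq (name : String) (k : Nat) (c : Char) (cs : List Char)
    (h : name.toList.reverse.drop k = c :: cs) :
    PySem.Str.slice name (some 0) (some (PySem.Str.len name - ((k : Int) + 1))) = String.ofList cs.reverse := by
  have hlen : name.length = name.toList.length := by simp
  have hk : k + 1 ≤ name.toList.length := by
    have := congrArg List.length h
    simp at this
    omega
  have hb : PySem.Str.len name - ((k : Int) + 1) = ((name.toList.length - (k+1) : Nat) : Int) := by
    simp [PySem.Str.len]
    omega
  have h1 : (PySem.Str.slice name (some 0) (some (PySem.Str.len name - ((k : Int) + 1)))).toList = cs.reverse := by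
    rw [PySem.Str.toList_slice, PySem.Chars.slice_eq_listSlice, hb]
    simp only [PySem.List.slice_zero_start, PySem.List.slice_to_natCast]
    have hrev : name.toList = name.toList.reverse.reverse := by simp
    rw [hrev, List.take_reverse]
    congr 1
    have h2 : name.toList.reverse.drop (k+1) = cs := by
      have := congrArg List.tail h
      simpa [List.tail_drop] using this
    have h3 : name.toList.reverse.length - (name.toList.reverse.reverse.length - (k+1)) = k+1 := by
      simp; omega
    rw [h3]
    exact h2
  rw [← h1, String.ofList_toList]

-- A's loop invariant: from position k (with the rest r of the reversed list) it computes basenameCore's match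
lemma loopA_eq (name : String) :
    ∀ (r : List Char) (k : Nat), name.toList.reverse.drop k = r →
      basenameLoopA name r k =
        (match r.dropWhile PySem.Chars.isdigit with
         | [] => ""
         | c :: t => if c = '_' then String.ofList t.reverse else "") := by
  intro r
  induction r with
  | nil => intro k h; rfl
  | cons c cs ih =>
    intro k h
    by_cases hd : PySem.Chars.isdigit c = true
    · rw [basenameLoopA, List.dropWhile_cons_of_pos hd]
      simp only [hd, not_true_eq_false, if_false]
      exact ih (k+1) (by have := congrArg List.tail h; simpa [List.tail_drop] using this)
    · rw [basenameLoopA, List.dropWhile_cons_of_neg hd]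
      simp only [hd]
      by_cases hc : c = '_'
      · simp only [hc, if_true]
        exact slice_tail_eq name k '_' cs (hc ▸ h)
      · simp [hc]

lemma A_eq_core (name : String) : get_basename_py name = basenameCore name := by
  unfold get_basename_py basenameCore
  exact loopA_eq name name.toList.reverse 0 (by simp)

-- the key fact, on an arbitrary list l (to be used with l = name.toList.reverse):
-- B's split-at-first-'_' plus all-digits test of the prefix equals core's skip-digits-then-look-for-'_'
lemma key (l : List Char) :
    (match l.dropWhile (fun c => decide (c ≠ '_')) with
     | [] => ""
     | _ :: r =>
        if (l.takeWhile (fun c => decide (c ≠ '_'))).all PySem.Chars.isdigit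
        then String.ofList r.reverse else "") =
    (match l.dropWhile PySem.Chars.isdigit with
     | [] => ""
     | c :: t => if c = '_' then String.ofList t.reverse else "") := by
  induction l with
  | nil => rfl
  | cons c cs ih =>
    by_cases hc : c = '_'
    · subst hc
      rw [List.dropWhile_cons_of_neg (by simp), List.takeWhile_cons_of_neg (by simp),
        List.dropWhile_cons_of_neg (by decide)]
      simp
    · by_cases hd : PySem.Chars.isdigit c = true
      · rw [List.dropWhile_cons_of_pos (by simp [hc]), List.takeWhile_cons_of_pos (by simp [hc]),
          List.dropWhile_cons_of_pos hd]
        simpa [hd] using ih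
      · rw [List.dropWhile_cons_of_pos (by simp [hc]), List.takeWhile_cons_of_pos (by simp [hc]),
          List.dropWhile_cons_of_neg hd]
        simp only [hc, if_false]
        cases cs.dropWhile (fun c => decide (c ≠ '_')) with
        | nil => rfl
        | cons x r => simp [hd]

lemma B_eq_core (name : String) : get_basename_py_alt name = basenameCore name := by
  unfold get_basename_py_alt basenameCore rpartitionU
  rw [List.span_eq_takeWhile_dropWhile]
  have hK := key name.toList.reverse
  cases hD : name.toList.reverse.dropWhile (fun c => decide (c ≠ '_')) with
  | nil =>
    rw [hD] at hK
    simpa using hK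
  | cons x r =>
    rw [hD] at hK
    have hcond : ((name.toList.reverse.takeWhile (fun c => decide (c ≠ '_'))).reverse.isEmpty
          || PySem.Chars.strIsdigit (name.toList.reverse.takeWhile (fun c => decide (c ≠ '_'))).reverse)
        = (name.toList.reverse.takeWhile (fun c => decide (c ≠ '_'))).all PySem.Chars.isdigit := by
      cases htw : name.toList.reverse.takeWhile (fun c => decide (c ≠ '_')) with
      | nil => simp
      | cons y t =>
        have hemp : (t.reverse ++ [y]).isEmpty = false := by simp
        cases hy : PySem.Chars.isdigit y <;>
          simp [PySem.Chars.strIsdigit, List.all_reverse, hy, hemp]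
    show (if ((List.takeWhile (fun c => decide (c ≠ '_')) name.toList.reverse).reverse.isEmpty ||
        PySem.Chars.strIsdigit (List.takeWhile (fun c => decide (c ≠ '_')) name.toList.reverse).reverse) = true
      then String.ofList r.reverse else "") = _
    rw [hcond]
    exact hK

-- ===== VERDICT (by name: the statement is the Claim_ definition above) =====
theorem get_basename_py_spec : Claim_equal_get_basename_py := by
  intro name _
  unfold Spec_get_basename_py
  rw [A_eq_core, B_eq_core]
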